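-- pv_equiv track=rewrite | github.com/nurs404/wdac-tool | data/remote_handler.py | parse_pc_range
-- ===== SOURCE A (Python) =====
-- def parse_pc_range(range_str: str, max_pcs: int = 25) -> list[str]:
--     """
--     Convert a range string to a sorted list of PC hostnames.
--
--     Examples
--     --------
--     "all"         →  ["PC-1", "PC-2", ..., "PC-25"]
--     "1-10"        →  ["PC-1", ..., "PC-10"]
--     "2-5,8,11-15" →  ["PC-2","PC-3","PC-4","PC-5","PC-8","PC-11",...]
--     """
--     if not range_str or range_str.strip().lower() == "all":
--         return [f"PC-{i}" for i in range(1, max_pcs + 1)]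
--
--     numbers: set[int] = set()
--     for token in range_str.split(","):
--         token = token.strip()
--         if "-" in token:
--             parts = token.split("-", 1)
--             try:
--                 numbers.update(range(int(parts[0]), int(parts[1]) + 1))
--             except ValueError:
--                 pass
--         else:
--             try:
--                 numbers.add(int(token))
--             except ValueError:
--                 pass
--
--     return [f"PC-{n}" for n in sorted(numbers) if 1 <= n <= max_pcs]
-- ===== SOURCE B (Python) =====
-- def parse_pc_range(range_str: str, max_pcs: int = 25) -> list[str]:
--     if not range_str or range_str.strip().lower() == "all":
--         return [f"PC-{i}" for i in range(1, max_pcs + 1)]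
--
--     intervals: list[tuple[int, int]] = []
--     for token in range_str.split(","):
--         token = token.strip()
--         if "-" in token:
--             lo_s, hi_s = token.split("-", 1)
--             try:
--                 intervals.append((int(lo_s), int(hi_s)))
--             except ValueError:
--                 pass
--         else:
--             try:
--                 v = int(token)
--                 intervals.append((v, v))
--             except ValueError:
--                 pass
--
--     if not intervals:
--         return []
--     lo = max(1, min(l for l, _ in intervals))
--     hi = min(max_pcs, max(h for _, h in intervals))
--     return [f"PC-{i}" for i in range(lo, hi + 1)
--             if any(l <= i <= h for l, h in intervals)]
-- ===== Notes on version B (the rewrite author's own statement) =====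
-- stated objective: alternative
-- what changed: B collects (lo, hi) intervals instead of expanding tokens into a number set, and builds the output by one in-order scan of the clamped range max(1,min lo)..min(max_pcs,max hi) with an interval-membership test, eliminating the set and the sort.
import Mathlib
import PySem

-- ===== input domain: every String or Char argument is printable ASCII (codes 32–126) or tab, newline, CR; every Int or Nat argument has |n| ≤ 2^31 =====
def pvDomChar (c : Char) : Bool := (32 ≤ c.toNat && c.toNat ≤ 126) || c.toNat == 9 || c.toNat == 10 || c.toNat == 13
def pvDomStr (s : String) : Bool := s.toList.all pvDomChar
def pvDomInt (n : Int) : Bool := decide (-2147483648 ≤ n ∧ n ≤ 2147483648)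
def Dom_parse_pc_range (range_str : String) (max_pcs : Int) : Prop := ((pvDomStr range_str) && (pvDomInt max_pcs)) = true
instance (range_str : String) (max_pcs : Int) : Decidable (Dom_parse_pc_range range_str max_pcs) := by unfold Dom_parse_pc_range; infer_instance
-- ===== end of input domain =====

-- B replaces A's sort-then-filter over a collected number set by a single in-order
-- scan of the output domain 1..max_pcs against a list of parsed (lo, hi) intervals
-- (no set, no sort); objective: alternative decomposition, same observable results.

-- ===== PORT A =====
-- loop body of A's 'for token in range_str.split(",")', accumulating the set 'numbers'
def pvStepA (numbers : PySem.Set Int) (token : String) : PySem.Set Int :=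
  let token := PySem.Str.strip token
  if PySem.Str.isIn "-" token then
    match PySem.Str.splitMax? token "-" 1 with
    | some [p0, p1] =>
      match PySem.Int.ofStr? p0, PySem.Int.ofStr? p1 with
      | some a, some b => PySem.Set.update numbers (PySem.List.pyRange a (b + 1) 1)
      | _, _ => numbers  -- except ValueError: pass
    | _ => numbers  -- unreachable: '-' ∈ token means split('-', 1) yields exactly two parts
  else
    match PySem.Int.ofStr? token with
    | some v => PySem.Set.add numbers v
    | none => numbers  -- except ValueError: pass

def parse_pc_range (range_str : String) (max_pcs : Int) : List String :=
  if range_str = "" ∨ PySem.Str.lower (PySem.Str.strip range_str) = "all" then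
    (PySem.List.pyRange 1 (max_pcs + 1) 1).map (fun i => "PC-" ++ PySem.Int.toStr i)
  else
    let numbers : PySem.Set Int :=
      ((PySem.Str.split? range_str ",").getD []).foldl pvStepA PySem.Set.empty
    ((PySem.List.sorted numbers (fun x => x) false).filter
        (fun n => decide (1 ≤ n ∧ n ≤ max_pcs))).map
      (fun n => "PC-" ++ PySem.Int.toStr n)

-- ===== PORT B =====
-- loop body of B's token loop, accumulating the interval list
def pvStepB (intervals : List (Int × Int)) (token : String) : List (Int × Int) :=
  let token := PySem.Str.strip token
  if PySem.Str.isIn "-" token then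
    match PySem.Str.splitMax? token "-" 1 with
    | some [lo_s, hi_s] =>
      match PySem.Int.ofStr? lo_s, PySem.Int.ofStr? hi_s with
      | some lo, some hi => intervals ++ [(lo, hi)]
      | _, _ => intervals  -- except ValueError: pass
    | _ => intervals  -- unreachable: '-' ∈ token means split('-', 1) yields exactly two parts
  else
    match PySem.Int.ofStr? token with
    | some v => intervals ++ [(v, v)]
    | none => intervals  -- except ValueError: pass

def parse_pc_range_alt (range_str : String) (max_pcs : Int) : List String :=
  if range_str = "" ∨ PySem.Str.lower (PySem.Str.strip range_str) = "all" then
    (PySem.List.pyRange 1 (max_pcs + 1) 1).map (fun i => "PC-" ++ PySem.Int.toStr i)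
  else
    -- ',' is a non-empty separator, so split? is always some
    let intervals : List (Int × Int) :=
      ((PySem.Str.split? range_str ",").getD []).foldl pvStepB []
    if intervals = [] then []
    else
      match PySem.List.min? (intervals.map (fun p => p.1)) (fun x => x),
            PySem.List.max? (intervals.map (fun p => p.2)) (fun x => x) with
      | some mn, some mx =>
        let lo := max 1 mn
        let hi := min max_pcs mx
        ((PySem.List.pyRange lo (hi + 1) 1).filter
            (fun i => intervals.any (fun p => decide (p.1 ≤ i ∧ i ≤ p.2)))).map
          (fun i => "PC-" ++ PySem.Int.toStr i)
      | _, _ => []  -- unreachable: min/max of a non-empty list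

-- ===== PRECONDITION & SPEC =====
def Spec_parse_pc_range (range_str : String) (max_pcs : Int) (out : List String) : Prop := out = parse_pc_range_alt range_str max_pcs
instance (range_str : String) (max_pcs : Int) (out : List String) : Decidable (Spec_parse_pc_range range_str max_pcs out) := by unfold Spec_parse_pc_range; infer_instance

-- ===== CLAIM (what is proved, stated in full; the proofs are below) =====
def Claim_equal_parse_pc_range : Prop := ∀ (range_str : String) (max_pcs : Int), Dom_parse_pc_range range_str max_pcs → Spec_parse_pc_range range_str max_pcs (parse_pc_range range_str max_pcs)

-- ===== LEMMAS AND PROOFS =====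

-- two strictly increasing Int lists with the same members are equal
theorem pv_eq_of_mem_iff_of_pairwise_lt : ∀ {xs ys : List Int},
    xs.Pairwise (· < ·) → ys.Pairwise (· < ·) → (∀ a, a ∈ xs ↔ a ∈ ys) → xs = ys := by
  intro xs
  induction xs with
  | nil =>
    intro ys _ _ h
    cases ys with
    | nil => rfl
    | cons y t => exact absurd ((h y).2 (List.mem_cons_self)) (List.not_mem_nil)
  | cons x xt ih =>
    intro ys hx hy h
    cases ys with
    | nil => exact absurd ((h x).1 (List.mem_cons_self)) (List.not_mem_nil)
    | cons y yt =>
      have hxy : x = y := by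
        have h1 : x ∈ y :: yt := (h x).1 (List.mem_cons_self)
        have h2 : y ∈ x :: xt := (h y).2 (List.mem_cons_self)
        rcases List.mem_cons.1 h1 with h1 | h1
        · exact h1
        · rcases List.mem_cons.1 h2 with h2 | h2
          · exact h2.symm
          · have := (List.pairwise_cons.1 hx).1 y h2
            have := (List.pairwise_cons.1 hy).1 x h1
            omega
      subst hxy
      have htail : ∀ a, a ∈ xt ↔ a ∈ yt := by
        intro a
        constructor
        · intro ha
          have hax : x < a := (List.pairwise_cons.1 hx).1 a ha
          rcases List.mem_cons.1 ((h a).1 (List.mem_cons_of_mem _ ha)) with h' | h'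
          · omega
          · exact h'
        · intro ha
          have hax : x < a := (List.pairwise_cons.1 hy).1 a ha
          rcases List.mem_cons.1 ((h a).2 (List.mem_cons_of_mem _ ha)) with h' | h'
          · omega
          · exact h'
      exact congrArg (x :: ·) (ih (List.pairwise_cons.1 hx).2 (List.pairwise_cons.1 hy).2 htail)

-- one token step preserves the set ↔ intervals correspondence
theorem pv_step_rel (s : PySem.Set Int) (ivs : List (Int × Int)) (t : String)
    (hnd : s.Nodup) (h : ∀ x : Int, x ∈ s ↔ ∃ p ∈ ivs, p.1 ≤ x ∧ x ≤ p.2) :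
    (pvStepA s t).Nodup ∧
      ∀ x : Int, x ∈ pvStepA s t ↔ ∃ p ∈ pvStepB ivs t, p.1 ≤ x ∧ x ≤ p.2 := by
  by_cases hd : PySem.Str.isIn "-" (PySem.Str.strip t) = true
  · simp only [pvStepA, pvStepB, hd, if_true]
    cases hsp : PySem.Str.splitMax? (PySem.Str.strip t) "-" 1 with
    | none => exact ⟨hnd, h⟩
    | some parts =>
      match parts with
      | [] => exact ⟨hnd, h⟩
      | [p0] => exact ⟨hnd, h⟩
      | p0 :: p1 :: p2 :: rest => exact ⟨hnd, h⟩
      | [p0, p1] =>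
        dsimp only
        cases ha : PySem.Int.ofStr? p0 with
        | none => dsimp only; exact ⟨hnd, h⟩
        | some a =>
          cases hb : PySem.Int.ofStr? p1 with
          | none => dsimp only; exact ⟨hnd, h⟩
          | some b =>
            dsimp only
            refine ⟨PySem.Set.nodup_update _ _ hnd, ?_⟩
            intro x
            rw [PySem.Set.mem_update, h x]
            simp only [List.mem_append, List.mem_singleton, PySem.List.mem_pyRange_one]
            constructor
            · rintro (⟨p, hp, hb1, hb2⟩ | ⟨h1, h2⟩)
              · exact ⟨p, Or.inl hp, hb1, hb2⟩
              · exact ⟨(a, b), Or.inr rfl, by omega⟩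
            · rintro ⟨p, hp | hp, hb1, hb2⟩
              · exact Or.inl ⟨p, hp, hb1, hb2⟩
              · subst hp
                simp only at hb1 hb2
                exact Or.inr (by omega)
  · rw [Bool.not_eq_true] at hd
    simp only [pvStepA, pvStepB, hd, Bool.false_eq_true, if_false]
    cases hv : PySem.Int.ofStr? (PySem.Str.strip t) with
    | none => exact ⟨hnd, h⟩
    | some w =>
      dsimp only
      refine ⟨PySem.Set.nodup_add _ _ hnd, ?_⟩
      intro x
      rw [PySem.Set.mem_add, h x]
      simp only [List.mem_append, List.mem_singleton]
      constructor
      · rintro (⟨p, hp, hb1, hb2⟩ | hxw)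
        · exact ⟨p, Or.inl hp, hb1, hb2⟩
        · exact ⟨(w, w), Or.inr rfl, by simp [hxw]⟩
      · rintro ⟨p, hp | hp, hb1, hb2⟩
        · exact Or.inl ⟨p, hp, hb1, hb2⟩
        · subst hp; simp only at hb1 hb2; omega

theorem pv_loop_rel (ts : List String) (s : PySem.Set Int) (ivs : List (Int × Int))
    (hnd : s.Nodup) (h : ∀ x : Int, x ∈ s ↔ ∃ p ∈ ivs, p.1 ≤ x ∧ x ≤ p.2) :
    (ts.foldl pvStepA s).Nodup ∧
      ∀ x : Int, x ∈ ts.foldl pvStepA s ↔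
        ∃ p ∈ ts.foldl pvStepB ivs, p.1 ≤ x ∧ x ≤ p.2 := by
  induction ts generalizing s ivs with
  | nil => exact ⟨hnd, h⟩
  | cons t ts ih =>
    simp only [List.foldl_cons]
    obtain ⟨hnd', h'⟩ := pv_step_rel s ivs t hnd h
    exact ih _ _ hnd' h'

-- ===== VERDICT (by name: the statement is the Claim_ definition above) =====
theorem parse_pc_range_spec : Claim_equal_parse_pc_range := by
  intro range_str max_pcs _
  unfold Spec_parse_pc_range parse_pc_range parse_pc_range_alt
  by_cases hall : range_str = "" ∨ PySem.Str.lower (PySem.Str.strip range_str) = "all"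
  · rw [if_pos hall, if_pos hall]
  · rw [if_neg hall, if_neg hall]
    obtain ⟨hnd, hmem⟩ := pv_loop_rel ((PySem.Str.split? range_str ",").getD []) PySem.Set.empty []
      List.nodup_nil (by simp [PySem.Set.empty])
    set nums := ((PySem.Str.split? range_str ",").getD []).foldl pvStepA PySem.Set.empty with hnums
    set ivs := ((PySem.Str.split? range_str ",").getD []).foldl pvStepB [] with hivs
    by_cases hnil : ivs = []
    · rw [if_pos hnil]
      have hempty : nums = [] := by
        apply List.eq_nil_iff_forall_not_mem.2
        intro x hx
        obtain ⟨p, hp, -⟩ := (hmem x).1 hx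
        rw [hnil] at hp
        exact List.not_mem_nil hp
      rw [hempty]
      rfl
    · rw [if_neg hnil]
      cases hmn : PySem.List.min? (ivs.map (fun p => p.1)) (fun x => x) with
      | none =>
        rw [PySem.List.min?_eq_none_iff, List.map_eq_nil_iff] at hmn
        exact absurd hmn hnil
      | some mn =>
        cases hmx : PySem.List.max? (ivs.map (fun p => p.2)) (fun x => x) with
        | none =>
          rw [PySem.List.max?_eq_none_iff, List.map_eq_nil_iff] at hmx
          exact absurd hmx hnil
        | some mx =>
          dsimp only
          refine congrArg (List.map _) ?_
          apply pv_eq_of_mem_iff_of_pairwise_lt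
          · have hple := PySem.List.sorted_pairwise nums (fun x : Int => x)
            have hperm := PySem.List.sorted_perm nums (fun x : Int => x) false
            have hndS : (PySem.List.sorted nums (fun x : Int => x) false).Nodup := hperm.nodup_iff.2 hnd
            have := List.Pairwise.and hple hndS
            exact (this.imp (fun {a b} hab => lt_of_le_of_ne hab.1 hab.2)).sublist List.filter_sublist
          · exact (PySem.List.pairwise_lt_pyRange_one _ _).sublist List.filter_sublist
          · intro a
            simp only [List.mem_filter, PySem.List.mem_sorted, PySem.List.mem_pyRange_one,
              List.any_eq_true, decide_eq_true_eq, hmem a]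
            constructor
            · rintro ⟨⟨p, hp, h1, h2⟩, hb⟩
              have hmn' := PySem.List.min?_isMin hmn p.1 (List.mem_map_of_mem hp)
              have hmx' := PySem.List.max?_isMax hmx p.2 (List.mem_map_of_mem hp)
              have hmn2 : mn ≤ p.1 := hmn'
              have hmx2 : p.2 ≤ mx := hmx'
              refine ⟨⟨?_, ?_⟩, p, hp, h1, h2⟩ <;> omega
            · rintro ⟨⟨hlo, hhi⟩, p, hp, h1, h2⟩
              exact ⟨⟨p, hp, h1, h2⟩, by omega⟩
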